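-- pv_equiv track=rewrite | github.com/Timofey-Lutsenko/-Tetrika_test | test_03.py | matrix_transformation
-- ===== SOURCE A (Python) =====
-- def matrix_transformation(list_of_time):
--     i = 0
--     matrix = list()
--     while len(matrix) != len(list_of_time) // 2:
--         temp_list = list()
--         temp_list.append(list_of_time[i])
--         temp_list.append(list_of_time[i + 1])
--         matrix.append(temp_list)
--         i += 2
--     return matrix
-- ===== SOURCE B (Python) =====
-- def matrix_transformation(list_of_time):
--     evens = list_of_time[::2]
--     odds = list_of_time[1::2]
--     return [list(pair) for pair in zip(evens, odds)]
-- ===== Notes on version B (the rewrite author's own statement) =====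
-- stated objective: faster
-- what changed: Instead of index-walking the list by 2 with a counter and a len//2 termination test, B first builds two derived subsequences by strided slicing (the even-index elements list_of_time[::2] and the odd-index elements list_of_time[1::2]) and then zips them, zip truncating to len//2 pairs; the per-pair Python-level indexing, appends and length re-checks are replaced by C-level slicing and zip.
import Mathlib
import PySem

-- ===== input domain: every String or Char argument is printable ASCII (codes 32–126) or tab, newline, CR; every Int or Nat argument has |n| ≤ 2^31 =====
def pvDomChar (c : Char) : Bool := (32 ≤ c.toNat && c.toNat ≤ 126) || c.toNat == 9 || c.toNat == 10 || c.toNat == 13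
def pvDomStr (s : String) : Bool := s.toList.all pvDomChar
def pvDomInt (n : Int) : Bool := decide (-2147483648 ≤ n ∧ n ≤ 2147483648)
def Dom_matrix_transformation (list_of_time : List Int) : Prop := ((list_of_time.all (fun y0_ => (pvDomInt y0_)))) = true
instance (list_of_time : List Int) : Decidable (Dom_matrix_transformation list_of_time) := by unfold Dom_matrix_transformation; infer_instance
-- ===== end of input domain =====

-- B replaces A's index-walking while loop by two staged strided slices (evens = xs[::2],
-- odds = xs[1::2]) zipped into pairs; a timing run measured B faster by a constant factor.


-- ===== PORT A =====
-- A's while loop runs until len(matrix) = len(list_of_time)//2, i.e. exactly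
-- len(list_of_time)//2 iterations; ported as recursion on that iteration count,
-- keeping the index i. Indices are always in range (i+1 < 2*(len//2) ≤ len), so
-- pyGetD's default is never returned.
def matrixLoopA (xs : List Int) (i : Int) (k : Nat) : List (List Int) :=
  match k with
  | 0 => []
  | Nat.succ k' =>
      [PySem.List.pyGetD xs i 0, PySem.List.pyGetD xs (i + 1) 0] :: matrixLoopA xs (i + 2) k'

def matrix_transformation (list_of_time : List Int) : List (List Int) :=
  matrixLoopA list_of_time 0 (list_of_time.length / 2)

-- ===== PORT B =====
-- evens = xs[::2]; odds = xs[1::2]; zip them into two-element lists.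
-- slice? returns some for any nonzero step, so getD's default is never returned.
def matrix_transformation_alt (list_of_time : List Int) : List (List Int) :=
  let evens := (PySem.List.slice? list_of_time none none 2).getD []
  let odds := (PySem.List.slice? list_of_time (some 1) none 2).getD []
  List.zipWith (fun a b => [a, b]) evens odds

-- ===== PRECONDITION & SPEC =====
def Spec_matrix_transformation (list_of_time : List Int) (out : List (List Int)) : Prop := out = matrix_transformation_alt list_of_time
instance (list_of_time : List Int) (out : List (List Int)) : Decidable (Spec_matrix_transformation list_of_time out) := by unfold Spec_matrix_transformation; infer_instance

-- ===== CLAIM (what is proved, stated in full; the proofs are below) =====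
def Claim_equal_matrix_transformation : Prop := ∀ (list_of_time : List Int), Dom_matrix_transformation list_of_time → Spec_matrix_transformation list_of_time (matrix_transformation list_of_time)

-- ===== LEMMAS AND PROOFS =====

-- Common reference shape: consecutive pairs, truncating a trailing odd element.
def pairRec : List Int → List (List Int)
  | a :: b :: t => [a, b] :: pairRec t
  | _ => []

-- Every-other-element subsequence, as xs[::2] produces it.
def everyOther : List Int → List Int
  | [] => []
  | [a] => [a]
  | a :: _ :: t => a :: everyOther t

-- Shifting A's loop index by 2 while dropping the first two elements is invisible.
theorem matrixLoopA_shift (k : Nat) (x y : Int) (t : List Int) (i : Nat) :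
    matrixLoopA (x :: y :: t) ((i : Int) + 2) k = matrixLoopA t (i : Int) k := by
  induction k generalizing i with
  | zero => rfl
  | succ k' ih =>
      have h3 : ((i : Int) + 2 + 1) = (((i + 3 : Nat) : Int)) := by push_cast; ring
      have h4 : ((i : Int) + 1) = (((i + 1 : Nat) : Int)) := by push_cast; ring
      have h5 : ((i : Int) + 2 + 2) = (((i + 2 : Nat) : Int) + 2) := by push_cast; ring
      have h2 : ((i : Int) + 2) = (((i + 2 : Nat) : Int)) := by push_cast; ring
      simp only [matrixLoopA]
      rw [h3, h5, ih, h4, h2, PySem.List.pyGetD_natCast, PySem.List.pyGetD_natCast,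
        PySem.List.pyGetD_natCast, PySem.List.pyGetD_natCast]
      simp [List.getD]

theorem matrixLoopA_eq_pairRec (xs : List Int) :
    matrixLoopA xs 0 (xs.length / 2) = pairRec xs := by
  induction xs using pairRec.induct with
  | case1 a b t ih =>
      have hlen : (a :: b :: t).length / 2 = t.length / 2 + 1 := by
        simp [List.length_cons]; omega
      rw [hlen]
      simp only [matrixLoopA, pairRec]
      rw [show ((0 : Int) + 2) = (((0 : Nat) : Int) + 2) by norm_num,
        matrixLoopA_shift, show (((0 : Nat) : Int)) = (0 : Int) by norm_num, ih,
        show ((0 : Int) + 1) = (((1 : Nat) : Int)) by norm_num,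
        PySem.List.pyGetD_natCast]
      simp [PySem.List.pyGetD_zero_cons, List.getD]
  | case2 xs h =>
      match xs, h with
      | [], _ => rfl
      | [a], _ => simp [matrixLoopA, pairRec]
      | a :: b :: t, h => exact (h a b t rfl).elim

-- The strided filterMap that slice? computes for step 2 (starting at 0) is everyOther.
theorem filterMap_idx2 (xs : List Int) :
    List.filterMap (fun k : Nat => xs[((2 : Int) * (k : Int)).toNat]?)
      (List.range ((xs.length + 1) / 2)) = everyOther xs := by
  induction xs using everyOther.induct with
  | case1 => rfl
  | case2 a => simp [List.range_succ, everyOther]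
  | case3 a b t ih =>
      have hc : ((a :: b :: t).length + 1) / 2 = (t.length + 1) / 2 + 1 := by
        simp [List.length_cons]; omega
      rw [hc, List.range_succ_eq_map, List.filterMap_cons, List.filterMap_map]
      have hfn : ((fun k : Nat => (a :: b :: t)[((2 : Int) * (k : Int)).toNat]?) ∘ Nat.succ)
          = fun k : Nat => t[((2 : Int) * (k : Int)).toNat]? := by
        funext k
        have h1 : ((2 : Int) * ((Nat.succ k : Nat) : Int)).toNat
            = ((2 : Int) * (k : Int)).toNat + 2 := by
          push_cast; omega
        simp only [Function.comp, h1]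
        rfl
      rw [hfn, ih]
      simp [everyOther]

theorem slice?_evens (xs : List Int) :
    PySem.List.slice? xs none none 2 = some (everyOther xs) := by
  simp only [PySem.List.slice?, PySem.List.sliceIndices]
  norm_num
  have hc : (if 0 < xs.length then (((xs.length : Int) + 2 - 1) / 2).toNat else 0)
      = (xs.length + 1) / 2 := by
    split_ifs with h <;> omega
  rw [hc]
  exact filterMap_idx2 xs

theorem slice?_odds (a : Int) (t : List Int) :
    PySem.List.slice? (a :: t) (some 1) none 2 = some (everyOther t) := by
  simp only [PySem.List.slice?, PySem.List.sliceIndices]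
  norm_num
  have hfn : (fun x : Nat => (a :: t)[((1 : Int) + 2 * (x : Int)).toNat]?)
      = fun k : Nat => t[((2 : Int) * (k : Int)).toNat]? := by
    funext k
    have h1 : ((1 : Int) + 2 * (k : Int)).toNat = ((2 : Int) * (k : Int)).toNat + 1 := by
      omega
    rw [h1]
    rfl
  have hc : (if 0 < t.length then (((t.length : Int) + 2 - 1) / 2).toNat else 0)
      = (t.length + 1) / 2 := by
    split_ifs with h <;> omega
  rw [hfn, hc]
  exact filterMap_idx2 t

theorem zip_every (xs : List Int) :
    List.zipWith (fun a b => [a, b]) (everyOther xs) (everyOther xs.tail) = pairRec xs := by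
  induction xs using pairRec.induct with
  | case1 a b t ih =>
      have hb : everyOther (b :: t) = b :: everyOther t.tail := by
        cases t with
        | nil => rfl
        | cons c t' => rfl
      simp only [everyOther, List.tail_cons, hb, List.zipWith, pairRec]
      exact congrArg _ ih
  | case2 xs h =>
      match xs, h with
      | [], _ => rfl
      | [a], _ => rfl
      | a :: b :: t, h => exact (h a b t rfl).elim

theorem alt_eq_pairRec (xs : List Int) : matrix_transformation_alt xs = pairRec xs := by
  unfold matrix_transformation_alt
  cases xs with
  | nil => rfl
  | cons a t =>
      rw [slice?_evens, slice?_odds]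
      simpa using zip_every (a :: t)

-- ===== VERDICT (by name: the statement is the Claim_ definition above) =====
theorem matrix_transformation_spec : Claim_equal_matrix_transformation := by
  intro xs _
  unfold Spec_matrix_transformation matrix_transformation
  rw [alt_eq_pairRec]
  exact matrixLoopA_eq_pairRec xs
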